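-- pv_equiv track=rewrite | github.com/rubengrootroessink/AdventOfCode | 2020/20/2.py | sea_monster_replace
-- ===== SOURCE A (Python) =====
-- def check_sea_monster(concatted_matrix, sea_monster, x, y, len_sea_monster):
--     count = 0
--     for i, row in enumerate(sea_monster):
--         for j, column in enumerate(row):
--             if column == "#":
--                 if concatted_matrix[x+i][y+j] == "#":
--                     count += 1
--     return count == len_sea_monster
--
-- def replace_sea_monster(matrix, sea_monster, x, y, len_sea_monster):
--     matrix = [list(row) for row in matrix]
--     count = 0
--     for i, row in enumerate(sea_monster):
--         for j, column in enumerate(row):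
--             if column == "#":
--                 matrix[x+i][y+j] = "O"
--     matrix = ["".join(row) for row in matrix]
--     return matrix
--
-- def sea_monster_replace(concatted_matrix):
--     sea_monster = [
--         "                  # ",
--         "#    ##    ##    ###",
--         " #  #  #  #  #  #   "
--     ]
--     len_sea_monster = 15
--
--     result_matrix = concatted_matrix.copy()
--
--     row_length = len(concatted_matrix[0])
--     count = 0
--     for i in range(0, len(concatted_matrix)-2):
--         for j in range(0, row_length - len(sea_monster[0])):
--             if check_sea_monster(concatted_matrix, sea_monster, i, j, len_sea_monster):
--                 result_matrix = replace_sea_monster(result_matrix, sea_monster, i, j, len_sea_monster)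
--
--     return result_matrix
-- ===== SOURCE B (Python) =====
-- # B: bit-parallel matching. Each grid row and each monster row becomes an integer
-- # bitmask of its '#' cells; a window matches iff three shift-and-mask integer
-- # tests succeed; matches are collected first and the grid is marked once.
-- MONSTER = [
--     "                  # ",
--     "#    ##    ##    ###",
--     " #  #  #  #  #  #   ",
-- ]
--
--
-- def _row_bits(row):
--     b = 0
--     for ch in reversed(row):
--         b = 2 * b + (1 if ch == "#" else 0)
--     return b
--
--
-- def sea_monster_replace(concatted_matrix):
--     masks = [_row_bits(r) for r in MONSTER]
--     bits = [_row_bits(r) for r in concatted_matrix]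
--     n = len(concatted_matrix)
--     row_length = len(concatted_matrix[0])
--     hits = []
--     for i in range(0, n - 2):
--         for j in range(0, row_length - 20):
--             if all((bits[i + d] >> j) & masks[d] == masks[d] for d in range(3)):
--                 hits = hits + [(i, j)]
--     grid = [list(row) for row in concatted_matrix]
--     for (i, j) in hits:
--         for di, mrow in enumerate(MONSTER):
--             for dj, c in enumerate(mrow):
--                 if c == "#":
--                     grid[i + di][j + dj] = "O"
--     return ["".join(row) for row in grid]
-- ===== Notes on version B (the rewrite author's own statement) =====
-- stated objective: alternative
-- what changed: B encodes every grid row and monster row as an integer bitmask of its '#' cells, detects each window with three shift-and-mask integer comparisons instead of A's per-cell counting scan, collects all hit positions in one scan and marks a single char-matrix copy once at the end, instead of A's rebuilding the whole string matrix (list()/join() of every row) for every monster found.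
import Mathlib
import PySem

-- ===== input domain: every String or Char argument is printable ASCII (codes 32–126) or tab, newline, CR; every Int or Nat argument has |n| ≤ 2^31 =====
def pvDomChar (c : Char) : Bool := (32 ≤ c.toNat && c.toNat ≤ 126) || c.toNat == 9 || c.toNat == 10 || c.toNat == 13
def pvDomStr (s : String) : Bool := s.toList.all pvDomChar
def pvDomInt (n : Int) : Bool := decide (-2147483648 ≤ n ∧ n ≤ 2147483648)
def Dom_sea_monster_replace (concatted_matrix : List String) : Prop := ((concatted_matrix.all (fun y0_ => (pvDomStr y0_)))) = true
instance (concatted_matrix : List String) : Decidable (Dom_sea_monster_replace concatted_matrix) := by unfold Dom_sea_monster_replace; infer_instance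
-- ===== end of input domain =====

-- B turns each grid row and each monster row into an integer bitmask of its '#'
-- cells, finds every monster window by three shift-and-mask integer tests,
-- collects the hit positions first and marks one char-matrix copy once at the
-- end, instead of A's per-cell counting scan and full string-matrix rebuild per
-- hit (objective: alternative; the claim is about the return value — neither
-- version mutates its argument).

-- ===== PORT A =====

-- concatted_matrix[x][y] as a Char; the ' ' default is only read outside Pre_
-- (where Python raises IndexError), never on admitted inputs.
def pvCell (m : List String) (x y : Int) : Char :=
  ((PySem.List.pyGet? m x).bind (fun r => PySem.Str.pyGet? r y)).getD ' '

-- matrix[x][y] = "O" on a char matrix; pySetD is exact for the in-range indices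
-- reached under Pre_ (out of range Python raises, excluded by Pre_).
def pvSetO (m : List (List Char)) (x y : Int) : List (List Char) :=
  PySem.List.pySetD m x (PySem.List.pySetD ((PySem.List.pyGet? m x).getD []) y 'O')

def pvSeaMonster : List String :=
  ["                  # ",
   "#    ##    ##    ###",
   " #  #  #  #  #  #   "]

def check_sea_monster (concatted_matrix : List String) (sea_monster : List String)
    (x y : Int) (len_sea_monster : Int) : Bool :=
  let count : Int :=
    (PySem.List.enumerate sea_monster 0).foldl (fun count p =>
      (PySem.List.enumerate p.2.toList 0).foldl (fun count q =>
        if q.2 = '#' then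
          (if pvCell concatted_matrix (x + p.1) (y + q.1) = '#' then count + 1 else count)
        else count) count) 0
  count == len_sea_monster

def replace_sea_monster (matrix : List String) (sea_monster : List String)
    (x y : Int) (_len_sea_monster : Int) : List String :=
  let m := matrix.map (fun row => row.toList)
  let m :=
    (PySem.List.enumerate sea_monster 0).foldl (fun m p =>
      (PySem.List.enumerate p.2.toList 0).foldl (fun m q =>
        if q.2 = '#' then pvSetO m (x + p.1) (y + q.1) else m) m) m
  -- "".join(row) of single-character strings = String.ofList row (exact)
  m.map (fun row => String.ofList row)

def sea_monster_replace (concatted_matrix : List String) : List String :=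
  let sea_monster := pvSeaMonster
  let len_sea_monster : Int := 15
  let row_length : Int := PySem.Str.len ((PySem.List.pyGet? concatted_matrix 0).getD "")
  (PySem.List.pyRange 0 ((concatted_matrix.length : Int) - 2) 1).foldl (fun result_matrix i =>
    (PySem.List.pyRange 0 (row_length - PySem.Str.len ((PySem.List.pyGet? sea_monster 0).getD "")) 1).foldl
      (fun result_matrix j =>
        if check_sea_monster concatted_matrix sea_monster i j len_sea_monster then
          replace_sea_monster result_matrix sea_monster i j len_sea_monster
        else result_matrix) result_matrix) concatted_matrix

-- ===== PORT B =====

def pvMonsterB : List String :=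
  ["                  # ",
   "#    ##    ##    ###",
   " #  #  #  #  #  #   "]

-- _row_bits: b = 0; for ch in reversed(row): b = 2*b + (1 if ch == '#' else 0)
-- (the value is a non-negative Python int, so Nat is exact)
def rowBits (row : List Char) : Nat :=
  row.reverse.foldl (fun b c => 2 * b + (if c = '#' then 1 else 0)) 0

-- the inner generator: all((bits[i+d] >> j) & masks[d] == masks[d] for d in range(3));
-- j comes from range(0, …) so 0 ≤ j and j.toNat is exact for Python's '>> j';
-- the pyGetD defaults are never read (indices are in range on every call).
def pvHitB (bits masks : List Nat) (i j : Int) : Bool :=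
  (PySem.List.pyRange 0 3 1).all (fun d =>
    ((PySem.List.pyGetD bits (i + d) 0) >>> j.toNat) &&& (PySem.List.pyGetD masks d 0)
      == PySem.List.pyGetD masks d 0)

-- the marking body of B's final loop (grid[i+di][j+dj] = "O" for the '#' cells)
def markMonster (g : List (List Char)) (x y : Int) : List (List Char) :=
  (PySem.List.enumerate pvMonsterB 0).foldl (fun g q =>
    (PySem.List.enumerate q.2.toList 0).foldl (fun g r =>
      if r.2 = '#' then pvSetO g (x + q.1) (y + r.1) else g) g) g

def sea_monster_replace_alt (concatted_matrix : List String) : List String :=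
  let masks := pvMonsterB.map (fun r => rowBits r.toList)
  let bits := concatted_matrix.map (fun r => rowBits r.toList)
  let row_length : Int := PySem.Str.len ((PySem.List.pyGet? concatted_matrix 0).getD "")
  let hits := (PySem.List.pyRange 0 ((concatted_matrix.length : Int) - 2) 1).foldl (fun hits i =>
      (PySem.List.pyRange 0 (row_length - 20) 1).foldl (fun hits j =>
        if pvHitB bits masks i j then hits ++ [(i, j)] else hits) hits) ([] : List (Int × Int))
  let grid := concatted_matrix.map (fun row => row.toList)
  let grid := hits.foldl (fun g p => markMonster g p.1 p.2) grid
  grid.map (fun row => String.ofList row)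

-- ===== PRECONDITION & SPEC =====

-- Pre_ excludes the empty list (len(concatted_matrix[0]) raises IndexError) and,
-- conservatively, ragged grids that are large enough to be scanned (first row ≥ 21
-- chars and ≥ 3 rows with some row shorter than the first), where Python's indexing
-- of shorter rows can raise IndexError; a few such ragged grids on which A happens
-- to return (every scanned cell still in range) are excluded too.
def Pre_sea_monster_replace (concatted_matrix : List String) : Prop :=
  concatted_matrix ≠ [] ∧
    (concatted_matrix.length < 3 ∨ (concatted_matrix.headI).length < 21 ∨
      ∀ r ∈ concatted_matrix, (concatted_matrix.headI).length ≤ r.length)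

instance (concatted_matrix : List String) : Decidable (Pre_sea_monster_replace concatted_matrix) := by
  unfold Pre_sea_monster_replace; infer_instance

def pvWitness_sea_monster_replace : List String :=
  ["                  #  ",
   "#    ##    ##    ### ",
   " #  #  #  #  #  #    "]

def Spec_sea_monster_replace (concatted_matrix : List String) (out : List String) : Prop := out = sea_monster_replace_alt concatted_matrix
instance (concatted_matrix : List String) (out : List String) : Decidable (Spec_sea_monster_replace concatted_matrix out) := by unfold Spec_sea_monster_replace; infer_instance

-- ===== CLAIM (what is proved, stated in full; the proofs are below) =====
def Claim_equal_sea_monster_replace : Prop := ∀ (concatted_matrix : List String), Dom_sea_monster_replace concatted_matrix → Pre_sea_monster_replace concatted_matrix → Spec_sea_monster_replace concatted_matrix (sea_monster_replace concatted_matrix)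

-- ===== LEMMAS AND PROOFS =====

-- the 15 '#' offsets of the monster, the common reference point of both proofs
def pvOffsets : List (Int × Int) :=
  [(0,18),
   (1,0),(1,5),(1,6),(1,11),(1,12),(1,17),(1,18),(1,19),
   (2,1),(2,4),(2,7),(2,10),(2,13),(2,16)]

-- A's per-row counting loop is a countP over the enumerated row.
lemma row_fold_eq_countP (cm : List String) (x y k : Int) (row : List Char) (c : Int) :
    (PySem.List.enumerate row 0).foldl (fun c q =>
        if q.2 = '#' then
          (if pvCell cm (x + k) (y + q.1) = '#' then c + 1 else c)
        else c) c
      = c + ((PySem.List.enumerate row 0).countP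
          (fun q => q.2 == '#' && decide (pvCell cm (x + k) (y + q.1) = '#')) : Int) := by
  have hstep : (fun (c : Int) (q : Int × Char) =>
        if q.2 = '#' then
          (if pvCell cm (x + k) (y + q.1) = '#' then c + 1 else c)
        else c)
      = (fun (c : Int) (q : Int × Char) =>
          c + if (q.2 == '#' && decide (pvCell cm (x + k) (y + q.1) = '#')) = true then 1 else 0) := by
    funext c q
    by_cases h1 : q.2 = '#' <;> by_cases h2 : pvCell cm (x + k) (y + q.1) = '#' <;>
      simp [h1, h2]
  rw [hstep, PySem.List.foldl_add, PySem.List.sum_map_ite_one_zero]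

-- A's whole count is a countP over the 15 offsets of the monster.
lemma countA_eq (cm : List String) (x y : Int) :
    ((PySem.List.enumerate pvSeaMonster 0).foldl (fun count p =>
        (PySem.List.enumerate p.2.toList 0).foldl (fun count q =>
          if q.2 = '#' then
            (if pvCell cm (x + p.1) (y + q.1) = '#' then count + 1 else count)
          else count) count) (0 : Int))
      = (pvOffsets.countP (fun d => pvCell cm (x + d.1) (y + d.2) = '#') : Int) := by
  have hE : PySem.List.enumerate pvSeaMonster 0
      = [((0:Int), "                  # "), ((1:Int), "#    ##    ##    ###"),
         ((2:Int), " #  #  #  #  #  #   ")] := rfl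
  have hR0 : ("                  # ").toList = [' ', ' ', ' ', ' ', ' ', ' ', ' ', ' ', ' ', ' ', ' ', ' ', ' ', ' ', ' ', ' ', ' ', ' ', '#', ' '] := rfl
  have hR1 : ("#    ##    ##    ###").toList = ['#', ' ', ' ', ' ', ' ', '#', '#', ' ', ' ', ' ', ' ', '#', '#', ' ', ' ', ' ', ' ', '#', '#', '#'] := rfl
  have hR2 : (" #  #  #  #  #  #   ").toList = [' ', '#', ' ', ' ', '#', ' ', ' ', '#', ' ', ' ', '#', ' ', ' ', '#', ' ', ' ', '#', ' ', ' ', ' '] := rfl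
  rw [hE]
  simp only [List.foldl_cons, List.foldl_nil]
  rw [row_fold_eq_countP cm x y 0, row_fold_eq_countP cm x y 1, row_fold_eq_countP cm x y 2]
  rw [hR0, hR1, hR2]
  simp [pvOffsets, List.countP_cons, PySem.List.enumerate_cons, PySem.List.enumerate_nil]
  omega

lemma check_eq (cm : List String) (x y : Int) :
    check_sea_monster cm pvSeaMonster x y 15
      = pvOffsets.all (fun d => pvCell cm (x + d.1) (y + d.2) = '#') := by
  simp only [check_sea_monster]
  rw [countA_eq]
  rw [Bool.eq_iff_iff]
  simp only [beq_iff_eq, List.all_eq_true]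
  rw [show (15 : Int) = ((pvOffsets.length : Nat) : Int) from rfl, Nat.cast_inj,
    List.countP_eq_length]

-- A's replace on matrices of the form g.map ofList is B's markMonster, mapped.
lemma replace_eq_mark (g : List (List Char)) (x y : Int) :
    replace_sea_monster (g.map String.ofList) pvSeaMonster x y 15
      = (markMonster g x y).map String.ofList := by
  have hA : PySem.List.enumerate pvSeaMonster 0
      = [((0:Int), "                  # "), ((1:Int), "#    ##    ##    ###"),
         ((2:Int), " #  #  #  #  #  #   ")] := rfl
  have hB : PySem.List.enumerate pvMonsterB 0
      = [((0:Int), "                  # "), ((1:Int), "#    ##    ##    ###"),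
         ((2:Int), " #  #  #  #  #  #   ")] := rfl
  simp only [replace_sea_monster, markMonster, hA, hB, List.map_map, Function.comp_def,
    String.toList_ofList, List.map_id']

-- rowBits in foldr form, for induction
lemma rowBits_cons (c : Char) (l : List Char) :
    rowBits (c :: l) = 2 * rowBits l + (if c = '#' then 1 else 0) := by
  simp only [rowBits, List.foldl_reverse, List.foldr_cons]

-- bit t of a row's bitmask reads exactly cell t of the row (' ' past the end)
lemma rowBits_testBit (l : List Char) (t : Nat) :
    (rowBits l).testBit t = decide (l.getD t ' ' = '#') := by
  induction l generalizing t with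
  | nil => simp [rowBits]
  | cons c l ih =>
    rcases t with _ | t
    · rw [rowBits_cons, Nat.testBit_zero]
      by_cases h : c = '#'
      · simp [h]
      · simp [h]
    · rw [rowBits_cons, Nat.testBit_succ]
      have h2 : (2 * rowBits l + (if c = '#' then 1 else 0)) / 2 = rowBits l := by
        split_ifs <;> omega
      rw [h2, ih]
      simp

-- the shift-and-mask window test, bit by bit
lemma mask_test_iff (b m s : Nat) :
    ((b >>> s) &&& m = m) ↔ ∀ t, m.testBit t = true → b.testBit (s + t) = true := by
  constructor
  · intro h t ht
    have := congrArg (fun n => n.testBit t) h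
    simp only [Nat.testBit_and, Nat.testBit_shiftRight, ht, Bool.and_true] at this
    exact this
  · intro h
    apply Nat.eq_of_testBit_eq
    intro t
    simp only [Nat.testBit_and, Nat.testBit_shiftRight]
    cases hmt : m.testBit t
    · simp
    · simp [h t hmt]

-- a mask below 2^20 whose bits are listed in ks quantifies exactly over ks
lemma testBit_iff_mem (m : Nat) (ks : List Nat) (h20 : m < 2 ^ 20)
    (hks : ∀ k ∈ ks, k < 20) (h : ∀ t < 20, (m.testBit t = true ↔ t ∈ ks)) :
    ∀ t, m.testBit t = true ↔ t ∈ ks := by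
  intro t
  by_cases ht : t < 20
  · exact h t ht
  · have hf : m.testBit t = false :=
      Nat.testBit_lt_two_pow (lt_of_lt_of_le h20 (Nat.pow_le_pow_right (by norm_num) (by omega)))
    constructor
    · intro hc; rw [hf] at hc; cases hc
    · intro hc; exact absurd (hks t hc) ht

-- pvCell on non-negative indices is a getD into the row's char list
lemma pvCell_eq_getD (cm : List String) (x y : Int) (hy : 0 ≤ y) :
    pvCell cm x y = ((PySem.List.pyGetD cm x "").toList).getD y.toNat ' ' := by
  obtain ⟨b, rfl⟩ := Int.eq_ofNat_of_zero_le hy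
  cases h : PySem.List.pyGet? cm x with
  | none => simp [pvCell, PySem.List.pyGetD, h, List.getD_eq_getElem?_getD]
  | some r => simp [pvCell, PySem.List.pyGetD, h, List.getD_eq_getElem?_getD]

-- the per-monster-row equivalence: one integer test = the row's cell tests
lemma maskRow_iff (cm : List String) (x j : Int) (hj : 0 ≤ j)
    (m : Nat) (ks : List Nat) (hm : ∀ t, m.testBit t = true ↔ t ∈ ks) :
    (((rowBits (PySem.List.pyGetD cm x "").toList) >>> j.toNat) &&& m = m)
      ↔ ∀ k ∈ ks, pvCell cm x (j + (k : Int)) = '#' := by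
  rw [mask_test_iff]
  constructor
  · intro h k hk
    have := h k ((hm k).mpr hk)
    rw [rowBits_testBit] at this
    have hcell := pvCell_eq_getD cm x (j + (k : Int)) (by omega)
    have htn : (j + (k : Int)).toNat = j.toNat + k := by omega
    rw [htn] at hcell
    rw [hcell]
    exact of_decide_eq_true this
  · intro h t ht
    have hk := (hm t).mp ht
    have hcell := pvCell_eq_getD cm x (j + (t : Int)) (by omega)
    have htn : (j + (t : Int)).toNat = j.toNat + t := by omega
    rw [htn] at hcell
    rw [rowBits_testBit]
    exact decide_eq_true (hcell ▸ h t hk)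

lemma bits_lookup (cm : List String) (x : Int) :
    PySem.List.pyGetD (cm.map (fun r => rowBits r.toList)) x 0
      = rowBits (PySem.List.pyGetD cm x "").toList := by
  have := PySem.List.pyGetD_map (fun r => rowBits r.toList) cm x ""
  simpa using this

-- the whole bit-parallel window test equals the 15 cell tests of pvOffsets
lemma hitB_eq (cm : List String) (i j : Int) (hj : 0 ≤ j) :
    pvHitB (cm.map (fun r => rowBits r.toList)) (pvMonsterB.map (fun r => rowBits r.toList)) i j
      = pvOffsets.all (fun d => pvCell cm (i + d.1) (j + d.2) = '#') := by
  have hr : PySem.List.pyRange 0 3 1 = [(0:Int), 1, 2] := rfl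
  have hm0 : PySem.List.pyGetD (pvMonsterB.map (fun r => rowBits r.toList)) 0 0 = 262144 := by decide
  have hm1 : PySem.List.pyGetD (pvMonsterB.map (fun r => rowBits r.toList)) 1 0 = 923745 := by decide
  have hm2 : PySem.List.pyGetD (pvMonsterB.map (fun r => rowBits r.toList)) 2 0 = 74898 := by decide
  have k0 := maskRow_iff cm (i + 0) j hj 262144 [18] (by
    apply testBit_iff_mem <;> decide)
  have k1 := maskRow_iff cm (i + 1) j hj 923745 [0,5,6,11,12,17,18,19] (by
    apply testBit_iff_mem <;> decide)
  have k2 := maskRow_iff cm (i + 2) j hj 74898 [1,4,7,10,13,16] (by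
    apply testBit_iff_mem <;> decide)
  rw [Bool.eq_iff_iff]
  simp only [pvHitB, hr, List.all_cons, List.all_nil, Bool.and_true, Bool.and_eq_true,
    beq_iff_eq, hm0, hm1, hm2]
  simp only [bits_lookup]
  rw [k0, k1, k2]
  simp only [pvOffsets, List.all_cons, List.all_nil, Bool.and_true, Bool.and_eq_true,
    decide_eq_true_eq, List.mem_cons, List.not_mem_nil, forall_eq_or_imp,
    IsEmpty.forall_iff]
  norm_num
  tauto

-- ===== VERDICT (by name: the statement is the Claim_ definition above) =====
lemma main_eq (cm : List String) :
    sea_monster_replace cm = sea_monster_replace_alt cm := by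
  unfold sea_monster_replace sea_monster_replace_alt
  have hlen : PySem.Str.len ((PySem.List.pyGet? pvSeaMonster 0).getD "") = 20 := rfl
  simp only [hlen]
  set L : Int := PySem.Str.len ((PySem.List.pyGet? cm 0).getD "") with hL
  set il := PySem.List.pyRange 0 ((cm.length : Int) - 2) 1 with hil
  set jl := PySem.List.pyRange 0 (L - 20) 1 with hjl
  set bits := cm.map (fun r => rowBits r.toList) with hbits
  set masks := pvMonsterB.map (fun r => rowBits r.toList) with hmasks
  -- B's hit collection is a flatMap of filters
  have hhits : (il.foldl (fun hits i =>
        jl.foldl (fun hits j =>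
          if pvHitB bits masks i j then hits ++ [(i, j)] else hits) hits) ([] : List (Int × Int)))
      = il.flatMap (fun i => (jl.filter (fun j => pvHitB bits masks i j)).map (fun j => (i, j))) := by
    have hin : ∀ (i : Int) (acc : List (Int × Int)),
        jl.foldl (fun hits j => if pvHitB bits masks i j then hits ++ [(i, j)] else hits) acc
          = acc ++ (jl.filter (fun j => pvHitB bits masks i j)).map (fun j => (i, j)) := by
      intro i acc
      exact PySem.List.foldl_append_if _ _ _ _
    calc il.foldl (fun hits i =>
          jl.foldl (fun hits j =>
            if pvHitB bits masks i j then hits ++ [(i, j)] else hits) hits) ([] : List (Int × Int))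
        = il.foldl (fun hits i =>
            hits ++ (jl.filter (fun j => pvHitB bits masks i j)).map (fun j => (i, j))) [] := by
          exact PySem.List.foldl_congr_mem _ _ _ _ (fun acc x _ => hin x acc)
      _ = _ := by
          rw [PySem.List.foldl_append_eq_flatMap]; rfl
  rw [hhits]
  -- marking along the collected hits = the guarded nested marking fold
  rw [List.foldl_flatMap]
  have hmark : ∀ (g0 : List (List Char)),
      il.foldl (fun g i =>
          ((jl.filter (fun j => pvHitB bits masks i j)).map (fun j => (i, j))).foldl
            (fun g p => markMonster g p.1 p.2) g) g0
        = il.foldl (fun g i =>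
            jl.foldl (fun g j =>
              if pvOffsets.all (fun d => pvCell cm (i + d.1) (j + d.2) = '#') then
                markMonster g i j else g) g) g0 := by
    intro g0
    refine PySem.List.foldl_congr_mem _ _ _ _ ?_
    intro g i _
    rw [List.foldl_map, List.foldl_filter]
    refine PySem.List.foldl_congr_mem _ _ _ _ ?_
    intro g' j hjmem
    have hj0 : 0 ≤ j := by
      have := PySem.List.mem_pyRange_one.mp hjmem; omega
    rw [hitB_eq cm i j hj0]
  rw [hmark]
  -- A's fold in the string world is the same nested fold in the char world
  have hinit : (cm.map (fun row => row.toList)).map String.ofList = cm := by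
    simp [List.map_map, Function.comp_def]
  have H : ∀ (g : List (List Char)) (i : Int),
      jl.foldl (fun result_matrix j =>
          if check_sea_monster cm pvSeaMonster i j 15 then
            replace_sea_monster result_matrix pvSeaMonster i j 15
          else result_matrix) (g.map String.ofList)
      = (jl.foldl (fun g j =>
            if pvOffsets.all (fun d => pvCell cm (i + d.1) (j + d.2) = '#') then
              markMonster g i j else g) g).map String.ofList := by
    intro g i
    refine List.foldl_hom (fun g : List (List Char) => g.map String.ofList) ?_
    intro g' j
    rw [check_eq cm i j]
    by_cases h : pvOffsets.all (fun d => pvCell cm (i + d.1) (j + d.2) = '#') = true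
    · rw [if_pos h, if_pos h]
      exact replace_eq_mark g' i j
    · rw [if_neg h, if_neg h]
  have step := List.foldl_hom (f := fun g : List (List Char) => g.map String.ofList)
      (g₁ := fun g i =>
        jl.foldl (fun g j =>
          if pvOffsets.all (fun d => pvCell cm (i + d.1) (j + d.2) = '#') then
            markMonster g i j else g) g)
      (g₂ := fun result_matrix i =>
        jl.foldl (fun result_matrix j =>
          if check_sea_monster cm pvSeaMonster i j 15 then
            replace_sea_monster result_matrix pvSeaMonster i j 15
          else result_matrix) result_matrix)
      (l := il) (init := cm.map (fun row => row.toList)) H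
  dsimp only at step
  rw [hinit] at step
  exact step

theorem sea_monster_replace_spec : Claim_equal_sea_monster_replace := by
  intro cm _ _
  unfold Spec_sea_monster_replace
  exact (main_eq cm).symm ▸ rfl
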